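-- pv_equiv track=rewrite | github.com/UltimateWilliamWu/Personal_Blog | content/UNSW/Principles of Programming/Lab/pythonProject/Quiz/quiz2.py | f
-- ===== SOURCE A (Python) =====
-- def f(L):
--     # REPLACE THE RETURN STATEMENT ABOVE WITH YOUR CODE
--     smaller_value = []
--     equal_value = []
--     bigger_value = []
--     for index in range(len(L)):
--         if index > L[index]:
--             smaller_value.append(L[index])
--         if index == L[index]:
--             equal_value.append(L[index])
--         if index < L[index]:
--             bigger_value.append(L[index])
--     return smaller_value + equal_value + bigger_value
-- ===== SOURCE B (Python) =====
-- def f(L):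
--     return [v for _, v in sorted(enumerate(L), key=lambda iv: 0 if iv[0] > iv[1] else 1 if iv[0] == iv[1] else 2)]
-- ===== Notes on version B (the rewrite author's own statement) =====
-- stated objective: alternative
-- what changed: Replaces the index loop with three accumulator lists by a single stable sort of enumerate(L) under the three-way group key (0 if index>value, 1 if equal, 2 if index<value), projecting out the values; stability reproduces A's within-group order.
import Mathlib
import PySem

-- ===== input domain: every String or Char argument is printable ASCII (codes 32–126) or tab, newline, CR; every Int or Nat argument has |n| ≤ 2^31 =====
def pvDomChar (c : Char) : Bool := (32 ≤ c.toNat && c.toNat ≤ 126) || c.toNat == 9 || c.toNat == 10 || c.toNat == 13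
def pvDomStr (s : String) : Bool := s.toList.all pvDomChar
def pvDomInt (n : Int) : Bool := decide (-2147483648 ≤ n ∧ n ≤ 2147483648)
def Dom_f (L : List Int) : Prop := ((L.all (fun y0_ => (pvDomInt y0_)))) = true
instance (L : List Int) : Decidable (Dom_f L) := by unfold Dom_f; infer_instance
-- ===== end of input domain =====

-- B replaces A's index loop with three accumulators by one stable sort of enumerate(L)
-- under the three-way group key; same return value, alternative algorithm (not faster).

-- ===== PORT A =====
def f (L : List Int) : List Int :=
  let t := (PySem.List.pyRange 0 (PySem.List.len L) 1).foldl
    (fun (acc : List Int × List Int × List Int) index =>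
      let v := PySem.List.pyGetD L index 0
      let acc := if index > v then (acc.1 ++ [v], acc.2.1, acc.2.2) else acc
      let acc := if index = v then (acc.1, acc.2.1 ++ [v], acc.2.2) else acc
      if index < v then (acc.1, acc.2.1, acc.2.2 ++ [v]) else acc)
    ([], [], [])
  t.1 ++ t.2.1 ++ t.2.2

-- ===== PORT B =====
-- the key lambda of Source B
def pvKey (p : Int × Int) : Int := if p.1 > p.2 then 0 else if p.1 = p.2 then 1 else 2

def f_alt (L : List Int) : List Int :=
  (PySem.List.sorted (PySem.List.enumerate L 0) pvKey).map (·.2)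

-- ===== PRECONDITION & SPEC =====
def Spec_f (L : List Int) (out : List Int) : Prop := out = f_alt L
instance (L : List Int) (out : List Int) : Decidable (Spec_f L out) := by unfold Spec_f; infer_instance

-- ===== CLAIM (what is proved, stated in full; the proofs are below) =====
def Claim_equal_f : Prop := ∀ (L : List Int), Dom_f L → Spec_f L (f L)

-- ===== LEMMAS AND PROOFS =====

-- the group of key k, in original order
def pvG (k : Int) (es : List (Int × Int)) : List (Int × Int) :=
  es.filter (fun p => pvKey p == k)

lemma pvKey_cases (p : Int × Int) : pvKey p = 0 ∨ pvKey p = 1 ∨ pvKey p = 2 := by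
  unfold pvKey; split_ifs <;> simp

lemma pvG_append (k : Int) (es es' : List (Int × Int)) :
    pvG k (es ++ es') = pvG k es ++ pvG k es' := List.filter_append ..

lemma pvKey_of_mem_pvG {k : Int} {p : Int × Int} {es : List (Int × Int)}
    (h : p ∈ pvG k es) : pvKey p = k := by
  have := (List.mem_filter.mp h).2; simpa using this

-- inserting between a prefix of not-before elements and a suffix of before elements
lemma insertBy_mid {α : Type} (before : α → α → Bool) (x : α) (A B : List α)
    (hA : ∀ a ∈ A, before x a = false) (hB : ∀ b ∈ B, before x b = true) :
    PySem.List.insertBy before x (A ++ B) = A ++ x :: B := by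
  induction A with
  | nil =>
      cases B with
      | nil => rfl
      | cons b B' => simp [PySem.List.insertBy, hB b (by simp)]
  | cons a A' ih =>
      simp only [List.cons_append, PySem.List.insertBy, hA a (by simp)]
      simp only [Bool.false_eq_true, if_false, List.cons.injEq, true_and]
      exact ih (fun a' h' => hA a' (by simp [h'])) 

-- stable sort under pvKey = concatenation of the three groups, in order
lemma sorted_groups (es : List (Int × Int)) :
    PySem.List.sorted es pvKey = pvG 0 es ++ pvG 1 es ++ pvG 2 es := by
  rw [PySem.List.sorted_eq_foldl_insertBy]
  induction es using List.reverseRecOn with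
  | nil => rfl
  | append_singleton es e ih =>
      rw [List.foldl_append, List.foldl_cons, List.foldl_nil, ih]
      have h01 : pvG 0 (es ++ [e]) = pvG 0 es ++ pvG 0 [e] := pvG_append ..
      have h11 : pvG 1 (es ++ [e]) = pvG 1 es ++ pvG 1 [e] := pvG_append ..
      have h21 : pvG 2 (es ++ [e]) = pvG 2 es ++ pvG 2 [e] := pvG_append ..
      rcases pvKey_cases e with hk | hk | hk
      · have g0 : pvG 0 [e] = [e] := by simp [pvG, List.filter, hk]
        have g1 : pvG 1 [e] = [] := by simp [pvG, List.filter, hk]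
        have g2 : pvG 2 [e] = [] := by simp [pvG, List.filter, hk]
        have hins : PySem.List.insertBy (fun a b => decide (pvKey a < pvKey b)) e
            (pvG 0 es ++ (pvG 1 es ++ pvG 2 es)) = pvG 0 es ++ e :: (pvG 1 es ++ pvG 2 es) := by
          apply insertBy_mid
          · intro a ha; have := pvKey_of_mem_pvG ha; simp [hk, this]
          · intro b hb
            rcases List.mem_append.mp hb with hb | hb <;>
              have := pvKey_of_mem_pvG hb <;> simp [hk, this]
        rw [h01, h11, h21, g0, g1, g2, List.append_nil, List.append_nil,
          List.append_assoc, hins]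
        simp
      · have g0 : pvG 0 [e] = [] := by simp [pvG, List.filter, hk]
        have g1 : pvG 1 [e] = [e] := by simp [pvG, List.filter, hk]
        have g2 : pvG 2 [e] = [] := by simp [pvG, List.filter, hk]
        have hins : PySem.List.insertBy (fun a b => decide (pvKey a < pvKey b)) e
            (pvG 0 es ++ pvG 1 es ++ pvG 2 es) = (pvG 0 es ++ pvG 1 es) ++ e :: pvG 2 es := by
          apply insertBy_mid
          · intro a ha
            rcases List.mem_append.mp ha with ha | ha <;>
              have := pvKey_of_mem_pvG ha <;> simp [hk, this]
          · intro b hb; have := pvKey_of_mem_pvG hb; simp [hk, this]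
        rw [h01, h11, h21, g0, g1, g2, List.append_nil, List.append_nil, hins]
        simp
      · have g0 : pvG 0 [e] = [] := by simp [pvG, List.filter, hk]
        have g1 : pvG 1 [e] = [] := by simp [pvG, List.filter, hk]
        have g2 : pvG 2 [e] = [e] := by simp [pvG, List.filter, hk]
        have hins : PySem.List.insertBy (fun a b => decide (pvKey a < pvKey b)) e
            (pvG 0 es ++ pvG 1 es ++ pvG 2 es) = (pvG 0 es ++ pvG 1 es ++ pvG 2 es) ++ [e] := by
          apply PySem.List.insertBy_of_forall_not_before
          intro a ha
          rcases List.mem_append.mp ha with ha | ha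
          · rcases List.mem_append.mp ha with ha | ha <;>
              have := pvKey_of_mem_pvG ha <;> simp [hk, this]
          · have := pvKey_of_mem_pvG ha; simp [hk, this]
        rw [h01, h11, h21, g0, g1, g2, List.append_nil, List.append_nil, hins]
        simp

-- A's loop body, on an (index, value) pair
def pvStep (acc : List Int × List Int × List Int) (p : Int × Int) :
    List Int × List Int × List Int :=
  let v := p.2
  let acc := if p.1 > v then (acc.1 ++ [v], acc.2.1, acc.2.2) else acc
  let acc := if p.1 = v then (acc.1, acc.2.1 ++ [v], acc.2.2) else acc
  if p.1 < v then (acc.1, acc.2.1, acc.2.2 ++ [v]) else acc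

lemma foldl_pvStep (es : List (Int × Int)) :
    ∀ (s e b : List Int),
    es.foldl pvStep (s, e, b) =
      (s ++ (pvG 0 es).map (·.2), e ++ (pvG 1 es).map (·.2), b ++ (pvG 2 es).map (·.2)) := by
  induction es with
  | nil => intro s e b; simp [pvG]
  | cons p es ih =>
      intro s e b
      rcases lt_trichotomy p.1 p.2 with h | h | h
      · have h1 : ¬ (p.1 > p.2) := by omega
        have h2 : p.1 ≠ p.2 := by omega
        rw [List.foldl_cons, show pvStep (s, e, b) p = (s, e, b ++ [p.2]) by
          simp [pvStep, h, h1, h2], ih]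
        simp [pvG, List.filter, pvKey, h1, h2]
      · have h1 : ¬ (p.1 > p.2) := by omega
        have h3 : ¬ (p.1 < p.2) := by omega
        rw [List.foldl_cons, show pvStep (s, e, b) p = (s, e ++ [p.2], b) by
          simp [pvStep, h, h1, h3], ih]
        simp [pvG, List.filter, pvKey, h]
      · have h2 : p.1 ≠ p.2 := by omega
        have h3 : ¬ (p.1 < p.2) := by omega
        rw [List.foldl_cons, show pvStep (s, e, b) p = (s ++ [p.2], e, b) by
          simp [pvStep, h, h2, h3], ih]
        simp [pvG, List.filter, pvKey, h]

-- enumerate(L) as the index range paired with lookups (what A's loop visits)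
lemma enum_eq_map_pyRange (L : List Int) :
    ∀ (a : Int), 0 ≤ a →
    (PySem.List.pyRange a (a + L.length) 1).map
        (fun j => (j, PySem.List.pyGetD L (j - a) 0)) = PySem.List.enumerate L a := by
  induction L with
  | nil => intro a _; simp [PySem.List.enumerate]
  | cons x xs ih =>
      intro a ha
      have hlen : (List.length (x :: xs) : Int) = (xs.length : Int) + 1 := by
        simp
      rw [hlen, PySem.List.pyRange_one_cons (by omega), List.map_cons,
        PySem.List.enumerate_cons]
      have hhead : PySem.List.pyGetD (x :: xs) (a - a) 0 = x := by
        rw [sub_self, PySem.List.pyGetD_of_nonneg _ _ le_rfl]; rfl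
      rw [hhead]
      congr 1
      · have hb : a + ((xs.length : Int) + 1) = (a + 1) + xs.length := by omega
        rw [hb, ← ih (a + 1) (by omega)]
        apply List.map_congr_left
        intro j hj
        have hj' := (PySem.List.mem_pyRange_one.mp hj).1
        have h0 : (0:Int) ≤ j - (a+1) := by omega
        rw [PySem.List.pyGetD_of_nonneg _ _ (by omega : (0:Int) ≤ j - a),
          PySem.List.pyGetD_of_nonneg _ _ h0]
        have : (j - a).toNat = (j - (a+1)).toNat + 1 := by omega
        rw [this, List.getD_cons_succ]

-- ===== VERDICT (by name: the statement is the Claim_ definition above) =====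
theorem f_spec : Claim_equal_f := by
  intro L _
  unfold Spec_f f f_alt
  have hmap : (PySem.List.pyRange 0 (PySem.List.len L) 1).foldl
      (fun (acc : List Int × List Int × List Int) index =>
        let v := PySem.List.pyGetD L index 0
        let acc := if index > v then (acc.1 ++ [v], acc.2.1, acc.2.2) else acc
        let acc := if index = v then (acc.1, acc.2.1 ++ [v], acc.2.2) else acc
        if index < v then (acc.1, acc.2.1, acc.2.2 ++ [v]) else acc)
      ([], [], []) = (PySem.List.enumerate L 0).foldl pvStep ([], [], []) := by
    rw [← enum_eq_map_pyRange L 0 (le_refl 0), List.foldl_map]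
    simp only [PySem.List.len, zero_add, sub_zero]
    rfl
  simp only [hmap, foldl_pvStep, List.nil_append]
  rw [sorted_groups]
  simp [List.map_append]
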